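-- pv_equiv track=rewrite | github.com/kkuntner/advent-of-code-2024 | 15/fifteen.py | transform_map
-- ===== SOURCE A (Python) =====
-- BOX = "O"
--
-- ROBOT = "@"
--
-- BLANK = "."
--
-- BIGBOX = "[]"
--
-- def transform_map(map):
--     new_map = []
--     for y in range(len(map)):
--         row = []
--         new_map.append(row)
--         for x in range(len(map[y])):
--             c = map[y][x]
--             if c == BOX:
--                 row.append(BIGBOX[0])
--                 row.append(BIGBOX[1])
--             elif c == ROBOT:
--                 row.append(ROBOT)
--                 row.append(BLANK)
--             else:
--                 row.append(c)
--                 row.append(c)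
--
--     return new_map
-- ===== SOURCE B (Python) =====
-- BOX = "O"
--
-- ROBOT = "@"
--
-- BLANK = "."
--
-- BIGBOX = "[]"
--
--
-- def _left(c):
--     # first character of the widened cell
--     return BIGBOX[0] if c == BOX else c
--
--
-- def _right(c):
--     # second character of the widened cell
--     if c == BOX:
--         return BIGBOX[1]
--     if c == ROBOT:
--         return BLANK
--     return c
--
--
-- def transform_map(map):
--     # Columnar decomposition: build the row of left halves and the row of
--     # right halves as two whole-row maps, then interleave them with zip.
--     new_map = []
--     for row in map:
--         lefts = [_left(c) for c in row]
--         rights = [_right(c) for c in row]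
--         new_map.append([x for pair in zip(lefts, rights) for x in pair])
--     return new_map
-- ===== Notes on version B (the rewrite author's own statement) =====
-- stated objective: alternative
-- what changed: Instead of A's single index-driven pass that branches per cell and appends two cells at a time, B computes two whole half-grids per row (the left halves and the right halves of every widened cell, each via its own total map) and then interleaves the two rows with zip to form the widened row.
import Mathlib
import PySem

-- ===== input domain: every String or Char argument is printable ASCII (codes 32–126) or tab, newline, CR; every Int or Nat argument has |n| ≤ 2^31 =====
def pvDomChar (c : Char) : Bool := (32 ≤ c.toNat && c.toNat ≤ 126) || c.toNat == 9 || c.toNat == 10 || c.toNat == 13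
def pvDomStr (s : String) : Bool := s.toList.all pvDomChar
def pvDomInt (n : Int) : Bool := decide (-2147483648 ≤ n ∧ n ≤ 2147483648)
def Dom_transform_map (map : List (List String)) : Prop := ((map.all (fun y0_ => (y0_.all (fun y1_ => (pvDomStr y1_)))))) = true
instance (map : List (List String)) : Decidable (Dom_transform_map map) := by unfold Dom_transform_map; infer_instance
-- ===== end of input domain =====

-- B builds each widened row columnar-wise: two whole-row maps (left halves, right halves)
-- interleaved with zip, instead of A's index-driven per-cell branch appending two cells at a time
-- (alternative decomposition, same cost).


-- ===== PORT A =====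
def pvBOX : String := "O"
def pvROBOT : String := "@"
def pvBLANK : String := "."

-- the body of A's inner loop: append the widened pair for one cell (BIGBOX[0]/BIGBOX[1]
-- of BIGBOX = "[]" ported as their literal one-character strings "[" and "]")
def pvStepA (row : List String) (c : String) : List String :=
  if c == pvBOX then row ++ ["[", "]"]
  else if c == pvROBOT then row ++ [pvROBOT, pvBLANK]
  else row ++ [c, c]

-- A's inner loop: for x in range(len(map[y])), reading c = map[y][x]
def pvRowA (rowy : List String) : List String :=
  List.foldl (fun row x => pvStepA row (PySem.List.pyGetD rowy x "")) []
    (PySem.List.pyRange 0 (PySem.List.len rowy) 1)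

def transform_map (map : List (List String)) : List (List String) :=
  List.foldl (fun new_map y => new_map ++ [pvRowA (PySem.List.pyGetD map y [])]) []
    (PySem.List.pyRange 0 (PySem.List.len map) 1)

-- ===== PORT B =====
-- _left(c): first character of the widened cell
def pvLeft (c : String) : String := if c == pvBOX then "[" else c

-- _right(c): second character of the widened cell
def pvRight (c : String) : String :=
  if c == pvBOX then "]" else if c == pvROBOT then pvBLANK else c

-- per row: lefts = map _left, rights = map _right, then interleave with zip
def transform_map_alt (map : List (List String)) : List (List String) :=
  map.map (fun row =>
    ((row.map pvLeft).zip (row.map pvRight)).flatMap (fun pair => [pair.1, pair.2]))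

-- ===== PRECONDITION & SPEC =====
def Spec_transform_map (map : List (List String)) (out : List (List String)) : Prop := out = transform_map_alt map
instance (map : List (List String)) (out : List (List String)) : Decidable (Spec_transform_map map out) := by unfold Spec_transform_map; infer_instance

-- ===== CLAIM (what is proved, stated in full; the proofs are below) =====
def Claim_equal_transform_map : Prop := ∀ (map : List (List String)), Dom_transform_map map → Spec_transform_map map (transform_map map)

-- ===== LEMMAS AND PROOFS =====

-- what one cell contributes in A, as a pure function of the cell
def pvFA (c : String) : List String :=
  if c == pvBOX then ["[", "]"]
  else if c == pvROBOT then [pvROBOT, pvBLANK]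
  else [c, c]

theorem pv_stepA_append (row : List String) (c : String) :
    pvStepA row c = row ++ pvFA c := by
  unfold pvStepA pvFA
  split_ifs <;> rfl

theorem pv_rowA_flat (rowy : List String) : pvRowA rowy = rowy.flatMap pvFA := by
  unfold pvRowA
  simp only [pv_stepA_append]
  rw [PySem.List.foldl_pyRange_zero_pyGetD rowy "" (fun row c => row ++ pvFA c) []]
  rw [PySem.List.foldl_append_eq_flatMap]
  simp

theorem pv_cell (c : String) : pvFA c = [pvLeft c, pvRight c] := by
  unfold pvFA pvLeft pvRight
  split_ifs with h1 h2 <;> simp_all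

-- ===== VERDICT (by name: the statement is the Claim_ definition above) =====
theorem transform_map_spec : Claim_equal_transform_map := by
  intro map _
  unfold Spec_transform_map
  unfold transform_map transform_map_alt
  rw [PySem.List.foldl_pyRange_zero_pyGetD map [] (fun nm r => nm ++ [pvRowA r]) []]
  rw [PySem.List.foldl_append_singleton_eq_map]
  simp only [List.nil_append]
  refine List.map_congr_left (fun row _ => ?_)
  rw [pv_rowA_flat, List.zip_map', List.flatMap_map]
  exact List.flatMap_congr (fun c _ => pv_cell c)
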